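-- pv_equiv track=rewrite | github.com/Dyalwayshappy/Spice | spice/entry/assist.py | _build_choice_alias_map
-- ===== SOURCE A (Python) =====
-- def _build_choice_alias_map(choices: tuple[str, ...]) -> dict[str, str]:
--     alias_map: dict[str, str] = {}
--     counts: dict[str, int] = {}
--     for choice in choices:
--         if not choice:
--             continue
--         alias = choice[0]
--         counts[alias] = counts.get(alias, 0) + 1
--         alias_map[alias] = choice
--     return {alias: value for alias, value in alias_map.items() if counts.get(alias, 0) == 1}
-- ===== SOURCE B (Python) =====
-- def _build_choice_alias_map(choices: tuple[str, ...]) -> dict[str, str]: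
--     firsts = sorted(c[0] for c in choices if c)
--     dup = {x for x, y in zip(firsts, firsts[1:]) if x == y}
--     return {c[0]: c for c in choices if c and c[0] not in dup}
-- ===== Notes on version B (the rewrite author's own statement) =====
-- stated objective: alternative
-- what changed: B drops A's counting table and alias->value map: it sorts the first characters of the nonempty choices, reads the duplicated ones off adjacent equal pairs of the sorted list, and then keeps each choice whose first character is not duplicated, re-deriving the value from the choice itself.
import Mathlib
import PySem

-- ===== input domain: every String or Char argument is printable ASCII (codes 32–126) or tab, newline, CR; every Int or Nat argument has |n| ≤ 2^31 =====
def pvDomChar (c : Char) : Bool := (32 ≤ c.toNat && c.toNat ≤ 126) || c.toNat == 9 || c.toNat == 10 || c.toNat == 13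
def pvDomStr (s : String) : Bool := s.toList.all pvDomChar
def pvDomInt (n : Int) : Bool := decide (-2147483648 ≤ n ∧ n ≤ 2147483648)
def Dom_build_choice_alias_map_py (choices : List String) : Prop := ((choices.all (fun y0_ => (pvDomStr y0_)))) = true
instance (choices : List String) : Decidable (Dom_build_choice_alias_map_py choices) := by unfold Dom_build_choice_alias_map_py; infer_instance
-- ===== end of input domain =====

-- B replaces A's counting tables with sort-then-scan: it sorts the first characters and detects duplicated ones as adjacent equal pairs; same return value.

-- ===== PORT A =====
-- A: one pass maintaining counts and a last-seen alias->choice map, then keep the map entries whose count is 1.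
def build_choice_alias_map_py (choices : List String) : List (String × String) :=
  let st := choices.foldl
    (fun (st : PySem.Dict String String × PySem.Dict String Int) choice =>
      if PySem.Str.len choice == 0 then st        -- `if not choice: continue`
      else
        match PySem.Str.pyGet? choice 0 with      -- choice[0]; `some` exactly because choice is nonempty
        | none => st
        | some c =>
          let al := String.mk [c]
          (st.1.insert al choice, st.2.insert al (st.2.getD al 0 + 1)))
    (PySem.Dict.empty, PySem.Dict.empty)
  (st.1.items.foldl
    (fun (d : PySem.Dict String String) p =>
      if st.2.getD p.1 0 == 1 then d.insert p.1 p.2 else d)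
    PySem.Dict.empty).items

-- ===== PORT B =====
-- B: sort the first characters of the nonempty choices, read the duplicated ones off adjacent
-- equal pairs of the sorted list, and keep the choices whose first character is not duplicated.
def build_choice_alias_map_py_alt (choices : List String) : List (String × String) :=
  let firsts := PySem.List.sorted
    (choices.filterMap (fun c => PySem.Str.pyGet? c 0))   -- `(c[0] for c in choices if c)`
    (fun x => x) false
  let dup : PySem.Set Char := PySem.Set.ofList            -- `{x for x, y in zip(firsts, firsts[1:]) if x == y}`
    (((firsts.zip (PySem.List.slice firsts (some 1) none)).filter
        (fun p => p.1 == p.2)).map (fun p => p.1))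
  (choices.foldl
    (fun (d : PySem.Dict String String) c =>
      match PySem.Str.pyGet? c 0 with                     -- `if c` then c[0]; none exactly when c is empty
      | none => d
      | some ch =>
        if !(PySem.Set.contains dup ch) then d.insert (String.mk [ch]) c else d)
    PySem.Dict.empty).items

-- ===== PRECONDITION & SPEC =====
def Spec_build_choice_alias_map_py (choices : List String) (out : List (String × String)) : Prop := out = build_choice_alias_map_py_alt choices
instance (choices : List String) (out : List (String × String)) : Decidable (Spec_build_choice_alias_map_py choices out) := by unfold Spec_build_choice_alias_map_py; infer_instance

-- ===== CLAIM (what is proved, stated in full; the proofs are below) =====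
def Claim_equal_build_choice_alias_map_py : Prop := ∀ (choices : List String), Dom_build_choice_alias_map_py choices → Spec_build_choice_alias_map_py choices (build_choice_alias_map_py choices)

-- ===== LEMMAS AND PROOFS =====

-- first character of a choice as a 1-character string ("" only for the empty string)
def pvFC (c : String) : String := match c.toList with | [] => "" | ch :: _ => String.mk [ch]
-- number of nonempty choices whose first character spells a
def pvCnt (l : List String) (a : String) : Nat :=
  ((l.filter (fun c => !c.toList.isEmpty)).map pvFC).count a

-- A's loop step, split into its two dict components
def pvStepM (d : PySem.Dict String String) (c : String) : PySem.Dict String String :=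
  match c.toList with | [] => d | ch :: _ => d.insert (String.mk [ch]) c
def pvStepC (d : PySem.Dict String Int) (c : String) : PySem.Dict String Int :=
  match c.toList with | [] => d | ch :: _ => d.insert (String.mk [ch]) (d.getD (String.mk [ch]) 0 + 1)

lemma pv_len_empty (c : String) (hc : c.toList = []) : (PySem.Str.len c == 0) = true := by
  simp [PySem.Str.len_eq, hc]

lemma pv_len_cons (c : String) (ch : Char) (tl : List Char) (hc : c.toList = ch :: tl) :
    (PySem.Str.len c == 0) = false := by
  simp only [PySem.Str.len_eq, hc]
  simp only [beq_eq_false_iff_ne, ne_eq]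
  intro h
  simp at h
  omega

lemma pv_get_empty (c : String) (hc : c.toList = []) : PySem.Str.pyGet? c 0 = none := by
  simp [PySem.Str.pyGet?, PySem.Chars.pyGet?_eq_listPyGet?, hc, PySem.List.pyGet?, PySem.List.pyIdx?]

lemma pv_get_cons (c : String) (ch : Char) (tl : List Char) (hc : c.toList = ch :: tl) :
    PySem.Str.pyGet? c 0 = some ch := by
  have : PySem.Str.pyGet? c 0 = PySem.List.pyGet? c.toList 0 := by
    simp [PySem.Str.pyGet?, PySem.Chars.pyGet?_eq_listPyGet?]
  rw [this, hc, PySem.List.pyGet?_zero_cons]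

lemma pv_fc_cons (c : String) (ch : Char) (tl : List Char) (hc : c.toList = ch :: tl) :
    pvFC c = String.mk [ch] := by
  simp [pvFC, hc]

lemma pvCnt_nil (a : String) : pvCnt [] a = 0 := by simp [pvCnt]

lemma pvCnt_cons_empty (c : String) (t : List String) (a : String) (hc : c.toList = []) :
    pvCnt (c :: t) a = pvCnt t a := by
  simp [pvCnt, List.filter_cons, hc]

lemma pvCnt_cons_nonempty (c : String) (t : List String) (a : String)
    (ch : Char) (tl : List Char) (hc : c.toList = ch :: tl) :
    pvCnt (c :: t) a = (if String.mk [ch] = a then 1 else 0) + pvCnt t a := by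
  simp only [pvCnt, List.filter_cons, hc, List.isEmpty_cons, Bool.not_false, if_pos,
    List.map_cons, List.count_cons, pv_fc_cons c ch tl hc]
  split_ifs <;> simp_all [pv_fc_cons c ch tl hc] <;> omega

-- A's pair fold is the product of the two component folds
lemma pv_fold_split (l : List String)
    (st : PySem.Dict String String × PySem.Dict String Int) :
    l.foldl
      (fun st choice =>
        if PySem.Str.len choice == 0 then st
        else
          match PySem.Str.pyGet? choice 0 with
          | none => st
          | some c =>
            let al := String.mk [c]
            (st.1.insert al choice, st.2.insert al (st.2.getD al 0 + 1))) st
    = (l.foldl pvStepM st.1, l.foldl pvStepC st.2) := by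
  induction l generalizing st with
  | nil => rfl
  | cons c t ih =>
    cases hc : c.toList with
    | nil =>
      simp only [List.foldl_cons, pv_len_empty c hc, if_pos, pvStepM, pvStepC, hc]
      simpa using ih st
    | cons ch tl =>
      simp only [List.foldl_cons, pv_len_cons c ch tl hc, pv_get_cons c ch tl hc,
        Bool.false_eq_true, if_false, pvStepM, pvStepC, hc]
      simpa using ih _

-- counts after the counting step: old count plus occurrences in l
lemma pv_cntC (l : List String) (d : PySem.Dict String Int) (a : String) :
    (l.foldl pvStepC d).getD a 0 = d.getD a 0 + (pvCnt l a : Int) := by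
  induction l generalizing d with
  | nil => simp [pvCnt]
  | cons c t ih =>
    cases hc : c.toList with
    | nil =>
      simp only [List.foldl_cons, pvStepC, hc]
      rw [ih, pvCnt_cons_empty c t a hc]
    | cons ch tl =>
      simp only [List.foldl_cons, pvStepC, hc]
      rw [ih, PySem.Dict.getD_insert, pvCnt_cons_nonempty c t a ch tl hc]
      by_cases h : a = String.mk [ch]
      · rw [if_pos h, if_pos h.symm, h]; push_cast; ring
      · rw [if_neg h, if_neg (fun hEq => h hEq.symm)]; push_cast; ring

-- absent keys stay absent in the alias map when their count is zero
lemma pv_containsM (l : List String) (d : PySem.Dict String String) (a : String)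
    (h0 : pvCnt l a = 0) (hd : d.contains a = false) :
    (l.foldl pvStepM d).contains a = false := by
  induction l generalizing d with
  | nil => simpa
  | cons c t ih =>
    cases hc : c.toList with
    | nil =>
      simp only [List.foldl_cons, pvStepM, hc]
      exact ih d (by rwa [pvCnt_cons_empty c t a hc] at h0) hd
    | cons ch tl =>
      rw [pvCnt_cons_nonempty c t a ch tl hc] at h0
      have hne : (a == String.mk [ch]) = false := by
        by_cases h : String.mk [ch] = a
        · rw [if_pos h] at h0; omega
        · exact beq_eq_false_iff_ne.mpr (fun hEq => h hEq.symm)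
      simp only [List.foldl_cons, pvStepM, hc]
      refine ih _ (by omega) ?_
      simp [PySem.Dict.contains_insert, hne, hd]

-- keys of the alias map stay distinct
lemma pv_nodupM (l : List String) (d : PySem.Dict String String) (h : d.keys.Nodup) :
    (l.foldl pvStepM d).keys.Nodup := by
  induction l generalizing d with
  | nil => simpa
  | cons c t ih =>
    cases hc : c.toList with
    | nil => simp only [List.foldl_cons, pvStepM, hc]; exact ih d h
    | cons ch tl =>
      simp only [List.foldl_cons, pvStepM, hc]
      exact ih _ (PySem.Dict.nodup_keys_insert _ _ _ h)

-- substituting the value at a key the filter rejects does not change the filtered items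
lemma pv_filter_subst (items : List (String × String)) (q : String → Bool) (a : String)
    (x : String) (hq : q a = false) :
    (items.map (fun p => if p.1 == a then (a, x) else p)).filter (fun p => q p.1)
      = items.filter (fun p => q p.1) := by
  induction items with
  | nil => rfl
  | cons p t ih =>
    by_cases h : p.1 = a
    · have hb : (p.1 == a) = true := beq_iff_eq.mpr h
      rw [List.map_cons, if_pos hb, List.filter_cons_of_neg (by simp [hq]),
          List.filter_cons_of_neg (by simp [h, hq]), ih]
    · have hb : (p.1 == a) = false := beq_eq_false_iff_ne.mpr h
      rw [List.map_cons, if_neg (by simp [hb]), List.filter_cons, List.filter_cons, ih]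

-- the filtered alias map lists exactly the uniquely-aliased choices, in order
lemma pv_filterM (l : List String) (q : String → Bool)
    (H : ∀ a, q a = true → pvCnt l a ≤ 1) :
    ((l.foldl pvStepM PySem.Dict.empty).items.filter (fun p => q p.1))
      = (l.filter (fun c => !c.toList.isEmpty && q (pvFC c))).map (fun c => (pvFC c, c)) := by
  induction l using List.reverseRecOn with
  | nil => rfl
  | append_singleton l x ih =>
    have Hl : ∀ a, q a = true → pvCnt l a ≤ 1 := by
      intro a hq
      have hle : pvCnt l a ≤ pvCnt (l ++ [x]) a := by
        simp only [pvCnt, List.filter_append, List.map_append, List.count_append]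
        omega
      exact le_trans hle (H a hq)
    rw [List.foldl_append]
    cases hc : x.toList with
    | nil =>
      simp only [List.foldl_cons, List.foldl_nil, pvStepM, hc]
      rw [ih Hl]
      simp [List.filter_append, hc]
    | cons ch tl =>
      simp only [List.foldl_cons, List.foldl_nil, pvStepM, hc]
      by_cases hq : q (String.mk [ch]) = true
      · have hcnt0 : pvCnt l (String.mk [ch]) = 0 := by
          have := H (String.mk [ch]) hq
          simp only [pvCnt, List.filter_append, List.map_append, List.count_append] at this
          have hone : pvCnt [x] (String.mk [ch]) = 1 := by
            rw [pvCnt_cons_nonempty x [] _ ch tl hc, pvCnt_nil]; simp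
          simp only [pvCnt] at hone ⊢
          omega
        have hnc : ((l.foldl pvStepM PySem.Dict.empty)).contains (String.mk [ch]) = false :=
          pv_containsM l _ _ hcnt0 (by simp)
        rw [PySem.Dict.items_insert_of_not_contains _ _ hnc, List.filter_append, ih Hl]
        simp [List.filter_append, List.filter_cons, hc, hq, pv_fc_cons x ch tl hc]
      · have hq' : q (String.mk [ch]) = false := by simpa using hq
        rw [PySem.Dict.items_insert]
        split_ifs with hcont
        · rw [pv_filter_subst _ _ _ _ hq', ih Hl]
          simp [List.filter_append, List.filter_cons, hc, hq', pv_fc_cons x ch tl hc]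
        · rw [List.filter_append, ih Hl]
          simp [List.filter_append, List.filter_cons, hc, hq', pv_fc_cons x ch tl hc]

-- a conditional-insert loop over fresh, distinct keys appends its selections
lemma pv_fold_insert {α : Type} (k : α → String) (v : α → String) (P : α → Bool) :
    ∀ (l : List α) (d : PySem.Dict String String),
      (∀ y ∈ l, P y = true → d.contains (k y) = false) → ((l.filter P).map k).Nodup →
      (l.foldl (fun d y => if P y then d.insert (k y) (v y) else d) d).items
        = d.items ++ (l.filter P).map (fun y => (k y, v y)) := by
  intro l
  induction l with
  | nil => simp
  | cons y t ih =>
    intro d hfresh hnd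
    by_cases hy : P y = true
    · simp only [List.foldl_cons, hy, if_pos, List.filter_cons_of_pos hy]
      have hnc : d.contains (k y) = false := hfresh y (by simp) hy
      have hnd' : ((t.filter P).map k).Nodup := by
        simp only [List.filter_cons_of_pos hy, List.map_cons] at hnd
        exact hnd.of_cons
      have hfresh' : ∀ z ∈ t, P z = true → (d.insert (k y) (v y)).contains (k z) = false := by
        intro z hz hPz
        rw [PySem.Dict.contains_insert]
        have hne : k z ≠ k y := by
          simp only [List.filter_cons_of_pos hy, List.map_cons, List.nodup_cons] at hnd
          intro hEq
          exact hnd.1 (hEq ▸ List.mem_map_of_mem (List.mem_filter.mpr ⟨hz, hPz⟩))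
        simp [hne, hfresh z (by simp [hz]) hPz]
      rw [ih _ hfresh' hnd', PySem.Dict.items_insert_of_not_contains _ _ hnc]
      simp
    · rw [List.filter_cons_of_neg hy] at hnd
      simp only [List.foldl_cons, if_neg hy, List.filter_cons_of_neg hy]
      exact ih _ (fun z hz hPz => hfresh z (by simp [hz]) hPz) hnd

-- A's final filter loop, applied: the alias map's keys are distinct, so it appends its selections
lemma pv_corA (M : PySem.Dict String String) (C : PySem.Dict String Int)
    (hnd : M.keys.Nodup) :
    (M.items.foldl
      (fun (d : PySem.Dict String String) p =>
        if C.getD p.1 0 == 1 then d.insert p.1 p.2 else d) PySem.Dict.empty).items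
    = M.items.filter (fun p => C.getD p.1 0 == 1) := by
  have h := pv_fold_insert (fun (p : String × String) => p.1) (fun p => p.2)
    (fun p => C.getD p.1 0 == 1) M.items PySem.Dict.empty
    (fun y _ _ => by simp)
    (by
      have hsub : List.Sublist ((M.items.filter (fun p => C.getD p.1 0 == 1)).map
          (fun (p : String × String) => p.1)) (M.items.map (fun p => p.1)) :=
        List.Sublist.map _ List.filter_sublist
      exact List.Nodup.sublist hsub hnd)
  simpa using h

-- one-character strings are equal exactly when their characters are
lemma pv_mk_inj (ch2 ch : Char) : String.mk [ch2] = String.mk [ch] ↔ ch2 = ch := by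
  constructor
  · intro h
    have h2 := congrArg String.toList h
    rw [show (String.mk [ch2]).toList = [ch2] from Eq.symm (String.ofList_eq.mp rfl),
        show (String.mk [ch]).toList = [ch] from Eq.symm (String.ofList_eq.mp rfl)] at h2
    simpa using h2
  · intro h; rw [h]

-- counting a first character over the filterMap of heads is pvCnt of its one-character string
lemma pv_cnt_firsts (l : List String) (ch : Char) :
    (l.filterMap (fun c => PySem.Str.pyGet? c 0)).count ch = pvCnt l (String.mk [ch]) := by
  induction l with
  | nil => simp [pvCnt_nil]
  | cons c t ih =>
    cases hc : c.toList with
    | nil =>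
      rw [List.filterMap_cons, pv_get_empty c hc, pvCnt_cons_empty c t _ hc]
      exact ih
    | cons ch2 tl =>
      rw [List.filterMap_cons, pv_get_cons c ch2 tl hc, pvCnt_cons_nonempty c t _ ch2 tl hc,
          List.count_cons, ih]
      by_cases he : ch2 = ch
      · rw [if_pos ((pv_mk_inj ch2 ch).mpr he)]
        simp [he]
        omega
      · rw [if_neg (fun hEq => he ((pv_mk_inj ch2 ch).mp hEq))]
        simp [he]

-- in a sorted (pairwise ≤) list, the first components of adjacent equal pairs are exactly the
-- characters occurring at least twice
lemma pv_dup_mem : ∀ (S : List Char), S.Pairwise (· ≤ ·) → ∀ ch : Char,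
    (ch ∈ ((S.zip S.tail).filter (fun p => p.1 == p.2)).map (fun p => p.1) ↔ 2 ≤ S.count ch) := by
  intro S
  induction S with
  | nil => intro _ ch; simp
  | cons a t ih =>
    intro h ch
    cases t with
    | nil =>
      have hle : List.count ch [a] ≤ 1 := by
        by_cases hca : a = ch <;> simp [List.count_cons, hca]
      simp only [List.tail_cons, List.zip_nil_right, List.filter_nil, List.map_nil,
        List.not_mem_nil, false_iff]
      omega
    | cons b t' =>
      have hp := List.pairwise_cons.mp h
      have hab : a ≤ b := hp.1 b (by simp)
      have IH := ih hp.2 ch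
      simp only [List.tail_cons, List.zip_cons_cons] at IH ⊢
      rw [List.filter_cons]
      by_cases heq : a = b
      · subst heq
        rw [if_pos (by simp), List.map_cons, List.mem_cons, IH]
        by_cases hca : ch = a
        · subst hca
          simp only [List.count_cons, beq_self_eq_true, if_pos, true_or, true_iff]
          omega
        · have hbf : (a == ch) = false := by
            simp only [beq_eq_false_iff_ne, ne_eq]
            exact fun hEq => hca hEq.symm
          simp [hca, List.count_cons, hbf]
      · rw [if_neg (by simpa using heq), IH]
        have hnm : a ∉ b :: t' := by
          intro hmem
          rcases List.mem_cons.mp hmem with h1 | h2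
          · exact heq h1
          · exact heq (le_antisymm hab ((List.pairwise_cons.mp hp.2).1 a h2))
        by_cases hca : ch = a
        · subst hca
          have h0 : (b :: t').count ch = 0 := List.count_eq_zero_of_not_mem hnm
          simp [List.count_cons, h0]
        · have hbf : (a == ch) = false := by
            simp only [beq_eq_false_iff_ne, ne_eq]
            exact fun hEq => hca hEq.symm
          simp [List.count_cons, hbf]

-- the selected aliases are pairwise distinct: each occurs exactly once among nonempty choices
lemma pv_nodupB (choices : List String) :
    ((choices.filter (fun c => !c.toList.isEmpty && (pvCnt choices (pvFC c) == 1))).map pvFC).Nodup := by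
  rw [List.nodup_iff_count_le_one]
  intro a
  by_cases hmem : a ∈ (choices.filter
      (fun c => !c.toList.isEmpty && (pvCnt choices (pvFC c) == 1))).map pvFC
  · obtain ⟨c, hcmem, hfc⟩ := List.mem_map.mp hmem
    have hcf := List.mem_filter.mp hcmem
    have hcnt : pvCnt choices (pvFC c) = 1 := by
      have := hcf.2
      simp only [Bool.and_eq_true, beq_iff_eq] at this
      exact this.2
    have hsub : List.Sublist
        ((choices.filter (fun c => !c.toList.isEmpty && (pvCnt choices (pvFC c) == 1))).map pvFC)
        ((choices.filter (fun c => !c.toList.isEmpty)).map pvFC) :=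
      List.Sublist.map _ (List.monotone_filter_right _
        (fun c h => by simp only [Bool.and_eq_true] at h; exact h.1))
    have hle := List.Sublist.count_le a hsub
    have : ((choices.filter (fun c => !c.toList.isEmpty)).map pvFC).count a = 1 := by
      rw [← hfc]; exact hcnt
    omega
  · simp [List.count_eq_zero_of_not_mem hmem]

-- ===== VERDICT (by name: the statement is the Claim_ definition above) =====
theorem build_choice_alias_map_py_spec : Claim_equal_build_choice_alias_map_py := by
  intro choices _
  show build_choice_alias_map_py choices = build_choice_alias_map_py_alt choices
  unfold build_choice_alias_map_py build_choice_alias_map_py_alt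
  simp only [pv_fold_split]
  set C := choices.foldl pvStepC PySem.Dict.empty with hCdef
  have hC : ∀ a, C.getD a 0 = (pvCnt choices a : Int) := by
    intro a
    rw [hCdef, pv_cntC]
    simp
  -- A side
  rw [pv_corA _ C (pv_nodupM choices PySem.Dict.empty (by simp))]
  rw [pv_filterM choices (fun a => C.getD a 0 == 1)
    (by intro a ha
        simp only [beq_iff_eq, hC a] at ha
        have : pvCnt choices a = 1 := by exact_mod_cast ha
        omega)]
  -- B side
  rw [PySem.List.slice_from_one]
  set F := choices.filterMap (fun c => PySem.Str.pyGet? c 0) with hF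
  set S := PySem.List.sorted F (fun x => x) false with hS
  set dup : PySem.Set Char := PySem.Set.ofList
    (((S.zip S.tail).filter (fun p => p.1 == p.2)).map (fun p => p.1)) with hdup
  have hScount : ∀ ch : Char, S.count ch = pvCnt choices (String.mk [ch]) := by
    intro ch
    rw [hS, List.Perm.count_eq (PySem.List.sorted_perm ..), hF, pv_cnt_firsts]
  have hSpair : S.Pairwise (· ≤ ·) := by
    have := PySem.List.sorted_pairwise (xs := F) (key := fun x => x)
    simpa [hS] using this
  have hdupmem : ∀ ch : Char, PySem.Set.contains dup ch = true ↔ 2 ≤ pvCnt choices (String.mk [ch]) := by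
    intro ch
    rw [show (PySem.Set.contains dup ch = true ↔ ch ∈ dup) from by simp [PySem.Set.contains],
        hdup, PySem.Set.mem_ofList, pv_dup_mem S hSpair ch, hScount ch]
  -- the selection loop in if-form over a total predicate
  have hstep : ∀ (d : PySem.Dict String String),
      choices.foldl
        (fun (d : PySem.Dict String String) c =>
          match PySem.Str.pyGet? c 0 with
          | none => d
          | some ch => if !(PySem.Set.contains dup ch) then d.insert (String.mk [ch]) c else d) d
      = choices.foldl
          (fun (d : PySem.Dict String String) c =>
            if (match c.toList with
                | [] => false
                | ch :: _ => !(PySem.Set.contains dup ch))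
            then d.insert (pvFC c) c else d) d := by
    generalize choices = l
    intro d
    induction l generalizing d with
    | nil => rfl
    | cons c t ihl =>
      cases hc : c.toList with
      | nil =>
        simp only [List.foldl_cons, pv_get_empty c hc, hc, Bool.false_eq_true, if_neg]
        exact ihl d
      | cons ch tl =>
        simp only [List.foldl_cons, pv_get_cons c ch tl hc, hc, pv_fc_cons c ch tl hc]
        exact ihl _
  rw [hstep]
  -- the if-form predicate agrees, on the members of choices, with 'count is exactly one'
  have hpB : ∀ c ∈ choices,
      (match c.toList with
       | [] => false
       | ch :: _ => !(PySem.Set.contains dup ch))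
      = (!c.toList.isEmpty && (pvCnt choices (pvFC c) == 1)) := by
    intro c hcmem
    cases hc : c.toList with
    | nil => simp [hc]
    | cons ch tl =>
      have hone : 1 ≤ pvCnt choices (String.mk [ch]) := by
        rw [← pv_cnt_firsts]
        refine List.count_pos_iff.mpr (List.mem_filterMap.mpr ⟨c, hcmem, ?_⟩)
        exact pv_get_cons c ch tl hc
      simp only [hc, List.isEmpty_cons, Bool.not_false, Bool.true_and, pv_fc_cons c ch tl hc]
      by_cases h2 : 2 ≤ pvCnt choices (String.mk [ch])
      · have hct : PySem.Set.contains dup ch = true := (hdupmem ch).mpr h2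
        rw [hct]
        have : (pvCnt choices (String.mk [ch]) == 1) = false := by
          simp only [beq_eq_false_iff_ne, ne_eq]
          omega
        rw [this]
        rfl
      · have hct : PySem.Set.contains dup ch = false := by
          rcases Bool.eq_false_or_eq_true (PySem.Set.contains dup ch) with ht | hf
          · exact absurd ((hdupmem ch).mp ht) h2
          · exact hf
        rw [hct]
        have : (pvCnt choices (String.mk [ch]) == 1) = true := by
          simp only [beq_iff_eq]
          omega
        rw [this]
        rfl
  have hfilt : choices.filter
      (fun c => match c.toList with
        | [] => false
        | ch :: _ => !(PySem.Set.contains dup ch))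
      = choices.filter (fun c => !c.toList.isEmpty && (pvCnt choices (pvFC c) == 1)) :=
    List.filter_congr hpB
  have h := pv_fold_insert pvFC (fun c => c)
    (fun c => match c.toList with
      | [] => false
      | ch :: _ => !(PySem.Set.contains dup ch)) choices PySem.Dict.empty
    (fun y _ _ => by simp) (by rw [hfilt]; exact pv_nodupB choices)
  rw [h, hfilt]
  have hpred : (fun c => !c.toList.isEmpty && (C.getD (pvFC c) 0 == 1))
      = (fun c => !c.toList.isEmpty && (pvCnt choices (pvFC c) == 1)) := by
    funext c
    rw [hC (pvFC c)]
    by_cases h1 : pvCnt choices (pvFC c) = 1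
    · simp [h1]
    · have h2 : ((pvCnt choices (pvFC c) : Int) == 1) = false := by
        simp only [beq_eq_false_iff_ne, ne_eq]
        exact_mod_cast h1
      have h3 : (pvCnt choices (pvFC c) == 1) = false := by
        simpa using h1
      rw [h2, h3]
  rw [hpred]
  simp [show (PySem.Dict.empty : PySem.Dict String String).items = [] from rfl]
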